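-- pv_equiv track=rewrite | github.com/99yuseong/Algorithm | 백준/Gold/17471. 게리맨더링/게리맨더링.py | solution
-- ===== SOURCE A (Python) =====
-- from collections import deque
--
-- def bfs(mask, graph, N):
--
--     queue = deque()
--
--     for i in range(1, N+1):
--         if mask & (1 << i):
--             queue.append(i)
--             mask &= ~(1 << i)
--             break
--
--     while queue:
--         cur = queue.popleft()
--
--         for near in graph[cur]:
--             if mask & (1 << near):
--                 queue.append(near)
--                 mask &= ~(1 << near)
--
--     return mask == 0
--
-- def solution(P, A):
--     # mask로 group을 2개로 나눌거임
--     # 나누고 BFS로 각각 이어짐을 확인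
--     # 인구수 비교 갱신
--     N = len(P)
--     graph = [[] for _ in range(N+1)]
--
--     for i in range(N):
--         graph[i+1] = A[i][1:]
--
--     total = sum(P)
--     min_diff = float('inf')
--
--     for mask in range(1 << 1, (1 << (N+1)) - 1):
--
--         full = (1 << (N+1)) - 2
--         other = mask ^ full
--
--         if bfs(mask, graph, N) and bfs(other, graph, N):
--             p = 0
--
--             for i in range(1, N+1):
--                 if mask & (1 << i):
--                     p += P[i-1]
--
--             min_diff = min(min_diff, abs(total - 2*p))
--
--     return min_diff if min_diff != float('inf') else -1
-- ===== SOURCE B (Python) =====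
-- def connected(mask, nbm, N):
--     # bitmask saturation closure instead of a queue BFS
--     low = mask & ~1
--     if low == 0:
--         return mask == 0
--     start = 0
--     for i in range(1, N + 1):
--         if mask >> i & 1:
--             start = i
--             break
--     reach = 1 << start
--     for _ in range(N + 1):
--         frontier = 0
--         for i in range(N + 1):
--             if reach >> i & 1:
--                 frontier |= nbm[i]
--         reach |= frontier & mask
--     return mask & ~reach == 0
--
--
-- def solution(P, A):
--     N = len(P)
--     # precompute one neighbour bitmask per node
--     nbm = [0] * (N + 1)
--     for i in range(N):
--         m = 0
--         for v in A[i][1:]: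
--             m |= 1 << v
--         nbm[i + 1] = m
--     total = sum(P)
--     min_diff = float('inf')
--     for mask in range(1 << 1, (1 << (N + 1)) - 1):
--         full = (1 << (N + 1)) - 2
--         other = mask ^ full
--         if connected(mask, nbm, N) and connected(other, nbm, N):
--             p = 0
--             for i in range(1, N + 1):
--                 if mask & (1 << i):
--                     p += P[i - 1]
--             min_diff = min(min_diff, abs(total - 2 * p))
--     return min_diff if min_diff != float('inf') else -1
-- ===== Notes on version B (the rewrite author's own statement) =====
-- stated objective: alternative
-- what changed: Replaces the per-subset queue/deque BFS over adjacency lists with neighbour bitmasks precomputed once and a bounded bitwise saturation closure (OR-ing neighbour masks of reached nodes N+1 times) to test connectivity of each group.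
import Mathlib
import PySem

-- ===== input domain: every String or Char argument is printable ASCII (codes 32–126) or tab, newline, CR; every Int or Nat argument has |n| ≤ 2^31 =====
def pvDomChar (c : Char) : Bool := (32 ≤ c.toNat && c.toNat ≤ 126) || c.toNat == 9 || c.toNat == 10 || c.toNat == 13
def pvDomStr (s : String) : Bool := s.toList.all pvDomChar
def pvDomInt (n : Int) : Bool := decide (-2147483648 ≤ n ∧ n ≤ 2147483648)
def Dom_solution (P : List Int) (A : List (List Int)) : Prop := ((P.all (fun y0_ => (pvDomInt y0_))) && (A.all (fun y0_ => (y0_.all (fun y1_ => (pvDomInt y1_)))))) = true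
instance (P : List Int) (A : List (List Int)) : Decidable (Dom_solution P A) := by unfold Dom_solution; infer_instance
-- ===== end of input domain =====

-- B replaces the per-subset queue BFS with precomputed neighbour bitmasks and a bounded
-- bitwise saturation closure; same return value on every input where Python A returns.

-- ===== PORT A =====

-- Python's `m & ~x` for nonnegative ints (exact: m ^ (m & x) = m & ~x bitwise)
def pyAndNot (m x : Nat) : Nat := m ^^^ (m &&& x)

theorem pv_testBit_pyAndNot (m x i : Nat) :
    (pyAndNot m x).testBit i = (m.testBit i && !(x.testBit i)) := by
  simp only [pyAndNot, Nat.testBit_xor, Nat.testBit_and]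
  cases m.testBit i <;> cases x.testBit i <;> rfl

theorem pv_pyAndNot_le (m x : Nat) : pyAndNot m x ≤ m := by
  refine Nat.le_of_testBit (fun i hi => ?_)
  rw [pv_testBit_pyAndNot] at hi
  exact (Bool.and_eq_true_iff.mp hi).1

theorem pv_pyAndNot_lt {m : Nat} (i : Nat) (h : m.testBit i = true) :
    pyAndNot m (1 <<< i) < m := by
  refine Nat.lt_of_le_of_ne (pv_pyAndNot_le _ _) (fun he => ?_)
  have := pv_testBit_pyAndNot m (1 <<< i) i
  rw [he, Nat.one_shiftLeft, Nat.testBit_two_pow] at this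
  simp [h] at this

-- one step of the Python `for near in graph[cur]` body
def pvStep (st : List Int × Nat) (near : Int) : List Int × Nat :=
  if 0 ≤ near ∧ st.2.testBit near.toNat then (st.1 ++ [near], pyAndNot st.2 (1 <<< near.toNat)) else st

-- measure bound for the BFS inner fold; cited by bfsInner's termination proof
theorem pv_bfsFold_measure (row : List Int) : ∀ (q : List Int) (m : Nat),
    (row.foldl pvStep
      (q, m)).1.length + 2 *
    (row.foldl pvStep
      (q, m)).2 ≤ q.length + 2 * m := by
  induction row with
  | nil => intro q m; simp
  | cons v rest ih =>
    intro q m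
    simp only [List.foldl_cons, pvStep]
    by_cases hc : 0 ≤ v ∧ m.testBit v.toNat = true
    · have hlt := pv_pyAndNot_lt v.toNat hc.2
      have := ih (q ++ [v]) (pyAndNot m (1 <<< v.toNat))
      simp only [if_pos hc] at *
      simp only [List.length_append, List.length_cons, List.length_nil] at this ⊢
      omega
    · simp only [if_neg hc]
      exact ih q m

-- the `while queue:` loop of Python bfs (queue, mask) → final mask
def bfsInner (graph : List (List Int)) : List Int → Nat → Nat
  | [], mask => mask
  | cur :: qs, mask =>
    let s := ((PySem.List.pyGet? graph cur).getD []).foldl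
      pvStep
      (qs, mask)
    bfsInner graph s.1 s.2
termination_by q mask => q.length + 2 * mask
decreasing_by
  have h := pv_bfsFold_measure ((PySem.List.pyGet? graph cur).getD []) qs mask
  simp only [List.length_cons]
  omega

-- Python bfs(mask, graph, N); `mask & (1 << i)` ported as testBit (exact for i ≥ 0)
def bfsA (mask : Nat) (graph : List (List Int)) (N : Nat) : Bool :=
  match (PySem.List.pyRange 1 ((N : Int) + 1) 1).find? (fun i => mask.testBit i.toNat) with
  | some i => bfsInner graph [i] (pyAndNot mask (1 <<< i.toNat)) == 0
  | none => bfsInner graph [] mask == 0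

def solution (P : List Int) (A : List (List Int)) : Int :=
  let N := P.length
  let graph := (List.range N).foldl
    (fun g i => g.set (i + 1) (PySem.List.slice ((PySem.List.pyGet? A (i : Int)).getD []) (some 1) none))
    (List.replicate (N + 1) ([] : List Int))
  let total := P.foldl (· + ·) 0
  let md := (PySem.List.pyRange 2 ((2 : Int) ^ (N + 1) - 1) 1).foldl
    (fun (md : Option Int) mi =>
      let mask := mi.toNat
      let full : Nat := 2 ^ (N + 1) - 2
      let other := mask ^^^ full
      if bfsA mask graph N && bfsA other graph N then
        let p := (PySem.List.pyRange 1 ((N : Int) + 1) 1).foldl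
          (fun p i => if mask.testBit i.toNat then p + (PySem.List.pyGet? P (i - 1)).getD 0 else p) 0
        some (match md with
          | none => |total - 2 * p|
          | some d => min d |total - 2 * p|)
      else md)
    none
  match md with
  | some d => d
  | none => -1

-- ===== PORT B =====

-- neighbour bitmask of one row; `1 << v` ported via toNat — exact for the nonnegative
-- ids Pre_ admits (on a negative id Source B raises, like A, and the input is outside Pre_)
def orMaskB (row : List Int) : Nat :=
  row.foldl (fun m v => m ||| (1 <<< v.toNat)) 0

-- connected(mask, nbm, N) of Source B: bounded bitwise saturation closure
def connB (mask : Nat) (nbm : List Nat) (N : Nat) : Bool :=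
  let low := pyAndNot mask 1
  if low == 0 then mask == 0
  else
    let start := match (PySem.List.pyRange 1 ((N : Int) + 1) 1).find? (fun i => mask.testBit i.toNat) with
      | some i => i.toNat
      | none => 0
    let reach := (List.range (N + 1)).foldl
      (fun reach _ =>
        let f := (List.range (N + 1)).foldl (fun f i => if reach.testBit i then f ||| nbm.getD i 0 else f) 0
        reach ||| (f &&& mask))
      (1 <<< start)
    pyAndNot mask reach == 0

def solution_alt (P : List Int) (A : List (List Int)) : Int :=
  let N := P.length
  let nbm := (List.range N).foldl
    (fun g i => g.set (i + 1) (orMaskB (PySem.List.slice ((PySem.List.pyGet? A (i : Int)).getD []) (some 1) none)))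
    (List.replicate (N + 1) (0 : Nat))
  let total := P.foldl (· + ·) 0
  let md := (PySem.List.pyRange 2 ((2 : Int) ^ (N + 1) - 1) 1).foldl
    (fun (md : Option Int) mi =>
      let mask := mi.toNat
      let full : Nat := 2 ^ (N + 1) - 2
      let other := mask ^^^ full
      if connB mask nbm N && connB other nbm N then
        let p := (PySem.List.pyRange 1 ((N : Int) + 1) 1).foldl
          (fun p i => if mask.testBit i.toNat then p + (PySem.List.pyGet? P (i - 1)).getD 0 else p) 0
        some (match md with
          | none => |total - 2 * p|
          | some d => min d |total - 2 * p|)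
      else md)
    none
  match md with
  | some d => d
  | none => -1

-- ===== PRECONDITION & SPEC =====

-- Both Pythons raise (no value) outside Pre_: IndexError when len(A) < len(P), and
-- ValueError (negative shift count, `1 << v`) when a neighbour entry (row tail) among
-- the first len(P) rows is negative. Pre_ excludes exactly those inputs.
def Pre_solution (P : List Int) (A : List (List Int)) : Prop :=
  P.length ≤ A.length ∧ ∀ row ∈ A.take P.length, ∀ x ∈ row.tail, 0 ≤ x
instance (P : List Int) (A : List (List Int)) : Decidable (Pre_solution P A) := by
  unfold Pre_solution; infer_instance

def pvWitness_solution : List Int × List (List Int) := ([3, 5], [[1, 2], [1, 1]])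

def Spec_solution (P : List Int) (A : List (List Int)) (out : Int) : Prop := out = solution_alt P A
instance (P : List Int) (A : List (List Int)) (out : Int) : Decidable (Spec_solution P A out) := by
  unfold Spec_solution; infer_instance

-- ===== CLAIM (what is proved, stated in full; the proofs are below) =====
def Claim_equal_solution : Prop := ∀ (P : List Int) (A : List (List Int)), Dom_solution P A → Pre_solution P A → Spec_solution P A (solution P A)

-- ===== LEMMAS AND PROOFS =====

theorem pv_testBit_le {m j n : Nat} (h : m < 2 ^ n) (hj : m.testBit j = true) : j < n := by
  by_contra hle
  have : m < 2 ^ j := lt_of_lt_of_le h (Nat.pow_le_pow_right (by omega) (by omega))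
  rw [Nat.testBit_eq_false_of_lt this] at hj
  exact absurd hj (by simp)

theorem pv_pyAndNot_eq_zero_iff (m x : Nat) :
    pyAndNot m x = 0 ↔ ∀ i, m.testBit i = true → x.testBit i = true := by
  constructor
  · intro h i hi
    have := pv_testBit_pyAndNot m x i
    rw [h, Nat.zero_testBit, hi] at this
    cases hx : x.testBit i
    · rw [hx] at this; simp at this
    · rfl
  · intro h
    refine Nat.eq_of_testBit_eq (fun i => ?_)
    rw [pv_testBit_pyAndNot, Nat.zero_testBit]
    cases hm : m.testBit i
    · rfl
    · rw [h i hm]; rfl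

-- reachability relation: one step follows a neighbour-bitmask edge into a node of m
def pvE (nb : Nat → Nat) (m : Nat) (i j : Nat) : Prop :=
  (nb i).testBit j = true ∧ m.testBit j = true

def pvRch (nb : Nat → Nat) (m : Nat) : Nat → Nat → Prop := Relation.ReflTransGen (pvE nb m)

theorem pv_rch_mono {nb : Nat → Nat} {m m' : Nat}
    (h : ∀ j, m.testBit j = true → m'.testBit j = true) {i j : Nat}
    (hr : pvRch nb m i j) : pvRch nb m' i j :=
  Relation.ReflTransGen.mono (fun _ _ hab => ⟨hab.1, h _ hab.2⟩) hr

-- path cutting: a path in m either stays in m' or can be restarted at a Q-node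
theorem pv_cut {nb : Nat → Nat} {m m' : Nat} {Q : Nat → Prop}
    (hsplit : ∀ j, m.testBit j = true → m'.testBit j = true ∨ Q j)
    {c j : Nat} (h : pvRch nb m c j) :
    pvRch nb m' c j ∨ ∃ k, Q k ∧ m.testBit k = true ∧ pvRch nb m' k j := by
  induction h with
  | refl => exact Or.inl Relation.ReflTransGen.refl
  | tail hab hbc ih =>
    obtain ⟨hnb, hmc⟩ := hbc
    rcases hsplit _ hmc with hm' | hq
    · rcases ih with h1 | ⟨k, hk, hmk, h2⟩
      · exact Or.inl (h1.tail ⟨hnb, hm'⟩)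
      · exact Or.inr ⟨k, hk, hmk, h2.tail ⟨hnb, hm'⟩⟩
    · exact Or.inr ⟨_, hq, hmc, Relation.ReflTransGen.refl⟩

-- the A-side fold over one row: resulting mask bits and queue membership
theorem pv_bfsFold_spec (row : List Int) : ∀ (q : List Int) (m : Nat),
    (∀ j : Nat, ((row.foldl pvStep
      (q, m)).2).testBit j = (m.testBit j && !decide ((j : Int) ∈ row)))
    ∧ (∀ c : Int, c ∈ (row.foldl pvStep
      (q, m)).1 ↔ c ∈ q ∨ (c ∈ row ∧ 0 ≤ c ∧ m.testBit c.toNat = true)) := by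
  induction row with
  | nil =>
    intro q m
    exact ⟨fun j => by simp, fun c => by simp⟩
  | cons v rest ih =>
    intro q m
    simp only [List.foldl_cons, pvStep]
    by_cases hc : 0 ≤ v ∧ m.testBit v.toNat = true
    · rw [if_pos hc]
      obtain ⟨ihb, ihq⟩ := ih (q ++ [v]) (pyAndNot m (1 <<< v.toNat))
      have h0 := hc.1
      have hveq : ∀ j : Nat, (v.toNat = j) ↔ ((j : Int) = v) := by intro j; omega
      constructor
      · intro j
        rw [ihb j, pv_testBit_pyAndNot, Nat.one_shiftLeft, Nat.testBit_two_pow]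
        have h1 : decide (v.toNat = j) = decide ((j : Int) = v) := decide_eq_decide.mpr (hveq j)
        have h2 : decide ((j : Int) ∈ v :: rest) = (decide ((j : Int) = v) || decide ((j : Int) ∈ rest)) := by
          simp [List.mem_cons]
        rw [h1, h2]
        cases m.testBit j <;> cases decide ((j : Int) = v) <;> cases decide ((j : Int) ∈ rest) <;> rfl
      · intro c
        rw [ihq c]
        simp only [List.mem_append, List.mem_cons, List.not_mem_nil, or_false]
        constructor
        · rintro ((hq | rfl) | ⟨h1, h2, h3⟩)
          · exact Or.inl hq
          · exact Or.inr ⟨Or.inl rfl, hc.1, hc.2⟩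
          · rw [pv_testBit_pyAndNot, Nat.one_shiftLeft, Nat.testBit_two_pow] at h3
            exact Or.inr ⟨Or.inr h1, h2, (Bool.and_eq_true_iff.mp h3).1⟩
        · rintro (hq | ⟨(rfl | h1), h2, h3⟩)
          · exact Or.inl (Or.inl hq)
          · exact Or.inl (Or.inr rfl)
          · by_cases hcv : c.toNat = v.toNat
            · have : c = v := by omega
              exact Or.inl (Or.inr this)
            · refine Or.inr ⟨h1, h2, ?_⟩
              rw [pv_testBit_pyAndNot, Nat.one_shiftLeft, Nat.testBit_two_pow, h3]
              simp [Ne.symm hcv]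
    · rw [if_neg hc]
      obtain ⟨ihb, ihq⟩ := ih q m
      constructor
      · intro j
        rw [ihb j]
        by_cases hj : (j : Int) = v
        · have h0 : 0 ≤ v := by omega
          have hb : m.testBit v.toNat = false := by
            cases hbit : m.testBit v.toNat
            · rfl
            · exact absurd ⟨h0, hbit⟩ hc
          have hjv : v.toNat = j := by omega
          rw [← hjv, hb]
          rfl
        · have : decide ((j : Int) ∈ v :: rest) = decide ((j : Int) ∈ rest) := by
            simp [List.mem_cons, hj]
          rw [this]
      · intro c
        rw [ihq c]
        simp only [List.mem_cons]
        constructor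
        · rintro (hq | ⟨h1, h2, h3⟩)
          · exact Or.inl hq
          · exact Or.inr ⟨Or.inr h1, h2, h3⟩
        · rintro (hq | ⟨(rfl | h1), h2, h3⟩)
          · exact Or.inl hq
          · exact absurd ⟨h2, h3⟩ hc
          · exact Or.inr ⟨h1, h2, h3⟩

-- heart of the A side: the BFS clears the mask completely iff every mask bit is reachable
theorem pv_bfsInner_iff (graph : List (List Int)) (nb : Nat → Nat) (N : Nat)
    (hrow : ∀ c : Int, 0 ≤ c → ∀ j : Nat,
      ((nb c.toNat).testBit j = true ↔ (j : Int) ∈ (PySem.List.pyGet? graph c).getD [])) :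
    ∀ (q : List Int) (m : Nat), m < 2 ^ (N + 1) →
      (∀ c ∈ q, 0 ≤ c ∧ m.testBit c.toNat = false) →
      (bfsInner graph q m = 0 ↔ ∀ j : Nat, m.testBit j = true → ∃ c ∈ q, pvRch nb m c.toNat j) := by
  have main : ∀ (μ : Nat) (q : List Int) (m : Nat), q.length + 2 * m < μ → m < 2 ^ (N + 1) →
      (∀ c ∈ q, 0 ≤ c ∧ m.testBit c.toNat = false) →
      (bfsInner graph q m = 0 ↔ ∀ j : Nat, m.testBit j = true → ∃ c ∈ q, pvRch nb m c.toNat j) := by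
    intro μ
    induction μ with
    | zero => intro q m hμ; omega
    | succ μ ih =>
      intro q m hμ hlt hq
      cases q with
      | nil =>
          rw [show bfsInner graph [] m = m from by simp [bfsInner]]
          constructor
          · rintro rfl j hj
            rw [Nat.zero_testBit] at hj
            cases hj
          · intro h
            refine Nat.eq_of_testBit_eq (fun i => ?_)
            rw [Nat.zero_testBit]
            cases hb : m.testBit i
            · rfl
            · obtain ⟨c, hc, -⟩ := h i hb
              exact absurd hc (List.not_mem_nil)
      | cons cur qs =>
          have hstep : bfsInner graph (cur :: qs) m =
              bfsInner graph (((PySem.List.pyGet? graph cur).getD []).foldl pvStep (qs, m)).1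
                (((PySem.List.pyGet? graph cur).getD []).foldl pvStep (qs, m)).2 := by
            rw [bfsInner]
          obtain ⟨sbits, squeue⟩ := pv_bfsFold_spec ((PySem.List.pyGet? graph cur).getD []) qs m
          have hcur := hq cur List.mem_cons_self
          have hsub : ∀ j, (((PySem.List.pyGet? graph cur).getD []).foldl pvStep (qs, m)).2.testBit j = true →
              m.testBit j = true := by
            intro j hj
            rw [sbits j] at hj
            exact (Bool.and_eq_true_iff.mp hj).1
          have hlt' : (((PySem.List.pyGet? graph cur).getD []).foldl pvStep (qs, m)).2 < 2 ^ (N + 1) :=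
            Nat.lt_of_le_of_lt (Nat.le_of_testBit hsub) hlt
          have hq' : ∀ c ∈ (((PySem.List.pyGet? graph cur).getD []).foldl pvStep (qs, m)).1,
              0 ≤ c ∧ (((PySem.List.pyGet? graph cur).getD []).foldl pvStep (qs, m)).2.testBit c.toNat = false := by
            intro c hc
            rcases (squeue c).mp hc with hcq | ⟨hcrow, hc0, hcbit⟩
            · obtain ⟨h0, hb⟩ := hq c (List.mem_cons_of_mem _ hcq)
              refine ⟨h0, ?_⟩
              rw [sbits, hb]
              rfl
            · refine ⟨hc0, ?_⟩
              rw [sbits]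
              have hmem : decide ((c.toNat : Int) ∈ (PySem.List.pyGet? graph cur).getD []) = true := by
                rw [decide_eq_true_eq, Int.toNat_of_nonneg hc0]
                exact hcrow
              rw [hmem]
              cases m.testBit c.toNat <;> rfl
          have hmeas := pv_bfsFold_measure ((PySem.List.pyGet? graph cur).getD []) qs m
          have ihh := ih (((PySem.List.pyGet? graph cur).getD []).foldl pvStep (qs, m)).1
            (((PySem.List.pyGet? graph cur).getD []).foldl pvStep (qs, m)).2
            (by simp only [List.length_cons] at hμ; omega) hlt' hq'
          rw [hstep, ihh]
          have hsplit : ∀ k, m.testBit k = true →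
              (((PySem.List.pyGet? graph cur).getD []).foldl pvStep (qs, m)).2.testBit k = true ∨
              ((k : Int) ∈ (PySem.List.pyGet? graph cur).getD [] ∧ m.testBit k = true) := by
            intro k hk
            by_cases hkrow : (k : Int) ∈ (PySem.List.pyGet? graph cur).getD []
            · exact Or.inr ⟨hkrow, hk⟩
            · left
              rw [sbits, hk]
              simp [hkrow]
          have hmkQ : ∀ (k j : Nat), ((k : Int) ∈ (PySem.List.pyGet? graph cur).getD [] ∧ m.testBit k = true) →
              pvRch nb (((PySem.List.pyGet? graph cur).getD []).foldl pvStep (qs, m)).2 k j →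
              ∃ c ∈ (((PySem.List.pyGet? graph cur).getD []).foldl pvStep (qs, m)).1,
                pvRch nb (((PySem.List.pyGet? graph cur).getD []).foldl pvStep (qs, m)).2 c.toNat j := by
            intro k j hkQ hp
            refine ⟨(k : Int), ?_, ?_⟩
            · rw [squeue]
              exact Or.inr ⟨hkQ.1, Int.natCast_nonneg k, by rw [Int.toNat_natCast]; exact hkQ.2⟩
            · rw [Int.toNat_natCast]
              exact hp
          constructor
          · intro hL j hj
            by_cases hjrow : (j : Int) ∈ (PySem.List.pyGet? graph cur).getD []
            · have hedge : (nb cur.toNat).testBit j = true := (hrow cur hcur.1 j).mpr hjrow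
              exact ⟨cur, List.mem_cons_self, Relation.ReflTransGen.single ⟨hedge, hj⟩⟩
            · have hj' : (((PySem.List.pyGet? graph cur).getD []).foldl pvStep (qs, m)).2.testBit j = true := by
                rw [sbits, hj]
                simp [hjrow]
              obtain ⟨c, hc, hpath⟩ := hL j hj'
              have hpath' : pvRch nb m c.toNat j := pv_rch_mono hsub hpath
              rcases (squeue c).mp hc with hcq | ⟨hcrow, hc0, hcbit⟩
              · exact ⟨c, List.mem_cons_of_mem _ hcq, hpath'⟩
              · have hedge : (nb cur.toNat).testBit c.toNat = true :=
                  (hrow cur hcur.1 c.toNat).mpr (by rw [Int.toNat_of_nonneg hc0]; exact hcrow)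
                exact ⟨cur, List.mem_cons_self, Relation.ReflTransGen.head ⟨hedge, hcbit⟩ hpath'⟩
          · intro hR j hj
            have hjm : m.testBit j = true := hsub j hj
            obtain ⟨c, hc, hpath⟩ := hR j hjm
            rcases List.mem_cons.mp hc with rfl | hcq
            · rcases Relation.ReflTransGen.cases_head hpath with heq | ⟨k, hstep1, hrest⟩
              · exfalso
                rw [heq] at hcur
                rw [hcur.2] at hjm
                cases hjm
              · obtain ⟨hedge, hkm⟩ := hstep1
                have hkrow : (k : Int) ∈ (PySem.List.pyGet? graph c).getD [] := (hrow c hcur.1 k).mp hedge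
                rcases pv_cut hsplit hrest with hp | ⟨k', hk'Q, _, hp⟩
                · exact hmkQ k j ⟨hkrow, hkm⟩ hp
                · exact hmkQ k' j hk'Q hp
            · rcases pv_cut hsplit hpath with hp | ⟨k', hk'Q, _, hp⟩
              · exact ⟨c, by rw [squeue]; exact Or.inl hcq, hp⟩
              · exact hmkQ k' j hk'Q hp
  intro q m hlt hq
  exact main (q.length + 2 * m + 1) q m (by omega) hlt hq

-- removing the start bit from the mask does not change reachability from start
theorem pv_drop_start {nb : Nat → Nat} {mask start j : Nat}
    (h : pvRch nb mask start j) :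
    j = start ∨ pvRch nb (pyAndNot mask (1 <<< start)) start j := by
  induction h with
  | refl => exact Or.inl rfl
  | @tail b c hab hbc ih =>
    by_cases hcs : c = start
    · exact Or.inl hcs
    · right
      have hm' : (pyAndNot mask (1 <<< start)).testBit c = true := by
        rw [pv_testBit_pyAndNot, Nat.one_shiftLeft, Nat.testBit_two_pow, hbc.2]
        simp [Ne.symm hcs]
      rcases ih with hb | h'
      · subst hb
        exact Relation.ReflTransGen.single ⟨hbc.1, hm'⟩
      · exact h'.tail ⟨hbc.1, hm'⟩

-- B-side saturation operator
def pvF (nbm : List Nat) (mask N r : Nat) : Nat :=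
  r ||| (((List.range (N + 1)).foldl (fun f i => if r.testBit i then f ||| nbm.getD i 0 else f) 0) &&& mask)

theorem pv_innerOr_testBit (nbm : List Nat) (r : Nat) : ∀ (n : Nat) (acc : Nat) (j : Nat),
    ((((List.range n).foldl (fun f i => if r.testBit i then f ||| nbm.getD i 0 else f) acc).testBit j = true)
    ↔ (acc.testBit j = true ∨ ∃ i, i < n ∧ r.testBit i = true ∧ (nbm.getD i 0).testBit j = true)) := by
  intro n
  induction n with
  | zero => intro acc j; simp
  | succ n ih =>
    intro acc j
    rw [List.range_succ, List.foldl_append]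
    simp only [List.foldl_cons, List.foldl_nil]
    by_cases hr : r.testBit n = true
    · rw [if_pos hr, Nat.testBit_or, Bool.or_eq_true_iff, ih]
      constructor
      · rintro ((h | ⟨i, hi, hri, hnb⟩) | h)
        · exact Or.inl h
        · exact Or.inr ⟨i, by omega, hri, hnb⟩
        · exact Or.inr ⟨n, by omega, hr, h⟩
      · rintro (h | ⟨i, hi, hri, hnb⟩)
        · exact Or.inl (Or.inl h)
        · by_cases hin : i = n
          · subst hin
            exact Or.inr hnb
          · exact Or.inl (Or.inr ⟨i, by omega, hri, hnb⟩)
    · rw [if_neg hr, ih]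
      constructor
      · rintro (h | ⟨i, hi, hri, hnb⟩)
        · exact Or.inl h
        · exact Or.inr ⟨i, by omega, hri, hnb⟩
      · rintro (h | ⟨i, hi, hri, hnb⟩)
        · exact Or.inl h
        · by_cases hin : i = n
          · subst hin
            exact absurd hri hr
          · exact Or.inr ⟨i, by omega, hri, hnb⟩

theorem pv_pvF_testBit (nbm : List Nat) (mask N r j : Nat) :
    ((pvF nbm mask N r).testBit j = true) ↔
      (r.testBit j = true ∨
        ((∃ i, i < N + 1 ∧ r.testBit i = true ∧ (nbm.getD i 0).testBit j = true) ∧ mask.testBit j = true)) := by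
  rw [pvF, Nat.testBit_or, Bool.or_eq_true_iff, Nat.testBit_and, Bool.and_eq_true_iff,
    pv_innerOr_testBit]
  rw [Nat.zero_testBit]
  simp

theorem pv_foldl_const_iterate (g : Nat → Nat) : ∀ (n : Nat) (x : Nat),
    (List.range n).foldl (fun r _ => g r) x = g^[n] x := by
  intro n
  induction n with
  | zero => intro x; simp
  | succ n ih =>
    intro x
    rw [List.range_succ, List.foldl_append, Function.iterate_succ_apply']
    simp [ih]

theorem pv_iter_sound (nbm : List Nat) (mask N start : Nat) : ∀ (k : Nat) (j : Nat),
    (((pvF nbm mask N)^[k] (1 <<< start)).testBit j = true) →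
    (j = start ∨ (mask.testBit j = true ∧ pvRch (fun i => nbm.getD i 0) mask start j)) := by
  intro k
  induction k with
  | zero =>
    intro j h
    rw [Function.iterate_zero_apply, Nat.one_shiftLeft, Nat.testBit_two_pow] at h
    exact Or.inl (decide_eq_true_eq.mp h).symm
  | succ k ih =>
    intro j h
    rw [Function.iterate_succ_apply'] at h
    rcases (pv_pvF_testBit nbm mask N _ j).mp h with h | ⟨⟨i, hiN, hri, hnb⟩, hmj⟩
    · exact ih j h
    · right
      refine ⟨hmj, ?_⟩
      rcases ih i hri with rfl | ⟨him, hpath⟩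
      · exact Relation.ReflTransGen.single ⟨hnb, hmj⟩
      · exact hpath.tail ⟨hnb, hmj⟩

theorem pv_iter_mono (nbm : List Nat) (mask N x j : Nat) (k : Nat)
    (h : x.testBit j = true) : ((pvF nbm mask N)^[k] x).testBit j = true := by
  induction k with
  | zero => exact h
  | succ k ih =>
    rw [Function.iterate_succ_apply']
    exact (pv_pvF_testBit nbm mask N _ j).mpr (Or.inl ih)

theorem pv_iter_fix (nbm : List Nat) (mask N start : Nat)
    (hm : mask < 2 ^ (N + 1)) (hstartN : start ≤ N) :
    pvF nbm mask N ((pvF nbm mask N)^[N + 1] (1 <<< start)) = (pvF nbm mask N)^[N + 1] (1 <<< start) := by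
  have hbits : ∀ k j, (((pvF nbm mask N)^[k] (1 <<< start)).testBit j = true) → j ≤ N := by
    intro k j h
    rcases pv_iter_sound nbm mask N start k j h with rfl | ⟨hmj, -⟩
    · exact hstartN
    · have := pv_testBit_le hm hmj
      omega
  have H : ∀ k : Nat,
      pvF nbm mask N ((pvF nbm mask N)^[k] (1 <<< start)) = (pvF nbm mask N)^[k] (1 <<< start) ∨
      k + 1 ≤ ((Finset.range (N + 1)).filter
        (fun i => ((pvF nbm mask N)^[k] (1 <<< start)).testBit i)).card := by
    intro k
    induction k with
    | zero =>
      right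
      refine Nat.succ_le_of_lt (Finset.card_pos.mpr ⟨start, ?_⟩)
      rw [Finset.mem_filter, Finset.mem_range]
      refine ⟨by omega, ?_⟩
      rw [Function.iterate_zero_apply, Nat.one_shiftLeft, Nat.testBit_two_pow]
      simp
    | succ k ih =>
      rcases ih with h | h
      · left
        rw [show (pvF nbm mask N)^[k + 1] (1 <<< start) =
            pvF nbm mask N ((pvF nbm mask N)^[k] (1 <<< start)) from
          Function.iterate_succ_apply' _ _ _, h]
        exact h
      · by_cases hfix : pvF nbm mask N ((pvF nbm mask N)^[k + 1] (1 <<< start)) =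
            (pvF nbm mask N)^[k + 1] (1 <<< start)
        · exact Or.inl hfix
        · right
          have hne : (pvF nbm mask N)^[k + 1] (1 <<< start) ≠ (pvF nbm mask N)^[k] (1 <<< start) := by
            intro he
            apply hfix
            rw [he, show pvF nbm mask N ((pvF nbm mask N)^[k] (1 <<< start)) =
                (pvF nbm mask N)^[k + 1] (1 <<< start) from
              (Function.iterate_succ_apply' _ _ _).symm]
            exact he
          have hsub' : ((Finset.range (N + 1)).filter
                (fun i => ((pvF nbm mask N)^[k] (1 <<< start)).testBit i)) ⊆
              ((Finset.range (N + 1)).filter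
                (fun i => ((pvF nbm mask N)^[k + 1] (1 <<< start)).testBit i)) := by
            intro i hi
            rw [Finset.mem_filter] at hi ⊢
            refine ⟨hi.1, ?_⟩
            rw [Function.iterate_succ_apply']
            exact (pv_pvF_testBit nbm mask N _ i).mpr (Or.inl hi.2)
          have hssub : ((Finset.range (N + 1)).filter
                (fun i => ((pvF nbm mask N)^[k] (1 <<< start)).testBit i)) ⊂
              ((Finset.range (N + 1)).filter
                (fun i => ((pvF nbm mask N)^[k + 1] (1 <<< start)).testBit i)) := by
            rw [Finset.ssubset_iff_of_subset hsub']
            obtain ⟨j, hj1, hj2⟩ : ∃ j, ((pvF nbm mask N)^[k + 1] (1 <<< start)).testBit j = true ∧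
                ((pvF nbm mask N)^[k] (1 <<< start)).testBit j = false := by
              by_contra hno
              push Not at hno
              apply hne
              refine Nat.eq_of_testBit_eq (fun i => ?_)
              cases h1 : ((pvF nbm mask N)^[k] (1 <<< start)).testBit i
              · cases h2 : ((pvF nbm mask N)^[k + 1] (1 <<< start)).testBit i
                · rfl
                · exact absurd (hno i h2) (by simp [h1])
              · rw [Function.iterate_succ_apply']
                exact (pv_pvF_testBit nbm mask N _ i).mpr (Or.inl h1)
            refine ⟨j, ?_, ?_⟩
            · rw [Finset.mem_filter, Finset.mem_range]
              exact ⟨Nat.lt_succ_of_le (hbits _ _ hj1), hj1⟩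
            · rw [Finset.mem_filter]
              rintro ⟨-, hjk⟩
              rw [hj2] at hjk
              cases hjk
          have := Finset.card_lt_card hssub
          omega
  rcases H (N + 1) with h | h
  · exact h
  · have hsubr : ((Finset.range (N + 1)).filter
        (fun i => ((pvF nbm mask N)^[N + 1] (1 <<< start)).testBit i)) ⊆ Finset.range (N + 1) :=
      Finset.filter_subset _ _
    have heq : ((Finset.range (N + 1)).filter
        (fun i => ((pvF nbm mask N)^[N + 1] (1 <<< start)).testBit i)) = Finset.range (N + 1) :=
      Finset.eq_of_subset_of_card_le hsubr (by rw [Finset.card_range]; omega)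
    have hall : ∀ i, i ≤ N → ((pvF nbm mask N)^[N + 1] (1 <<< start)).testBit i = true := by
      intro i hi
      have hmem : i ∈ (Finset.range (N + 1)).filter
          (fun i => ((pvF nbm mask N)^[N + 1] (1 <<< start)).testBit i) := by
        rw [heq, Finset.mem_range]
        omega
      exact of_decide_eq_true (by simpa using (Finset.mem_filter.mp hmem).2)
    refine Nat.eq_of_testBit_eq (fun j => ?_)
    cases hb : ((pvF nbm mask N)^[N + 1] (1 <<< start)).testBit j
    · by_cases hjN : j ≤ N
      · rw [hall j hjN] at hb
        cases hb
      · cases hFb : (pvF nbm mask N ((pvF nbm mask N)^[N + 1] (1 <<< start))).testBit j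
        · rfl
        · exfalso
          rcases (pv_pvF_testBit nbm mask N _ j).mp hFb with h1 | ⟨-, hmj⟩
          · rw [h1] at hb
            cases hb
          · exact hjN (by have := pv_testBit_le hm hmj; omega)
    · exact (pv_pvF_testBit nbm mask N _ j).mpr (Or.inl hb)

theorem pv_reach_char (nbm : List Nat) (N mask start : Nat)
    (hstart : mask.testBit start = true) (hstartN : start ≤ N) (hm : mask < 2 ^ (N + 1)) :
    ∀ j, ((pvF nbm mask N)^[N + 1] (1 <<< start)).testBit j = true ↔
      (j = start ∨ (mask.testBit j = true ∧ pvRch (fun k => nbm.getD k 0) mask start j)) := by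
  intro j
  constructor
  · intro h
    exact pv_iter_sound nbm mask N start (N + 1) j h
  · rintro (rfl | ⟨hmj, hpath⟩)
    · refine pv_iter_mono nbm mask N _ j (N + 1) ?_
      rw [Nat.one_shiftLeft, Nat.testBit_two_pow]
      simp
    · have hfix := pv_iter_fix nbm mask N start hm hstartN
      have hbitsle : ∀ y, (((pvF nbm mask N)^[N + 1] (1 <<< start)).testBit y = true) → y ≤ N := by
        intro y hy
        rcases pv_iter_sound nbm mask N start (N + 1) y hy with rfl | ⟨hmy, -⟩
        · exact hstartN
        · have := pv_testBit_le hm hmy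
          omega
      have aux : ∀ y, pvRch (fun k => nbm.getD k 0) mask start y →
          ((pvF nbm mask N)^[N + 1] (1 <<< start)).testBit y = true := by
        intro y hy
        induction hy with
        | refl =>
          refine pv_iter_mono nbm mask N _ start (N + 1) ?_
          rw [Nat.one_shiftLeft, Nat.testBit_two_pow]
          simp
        | @tail b c hab hbc ihy =>
          rw [← hfix]
          exact (pv_pvF_testBit nbm mask N _ c).mpr
            (Or.inr ⟨⟨b, by have := hbitsle b ihy; omega, ihy, hbc.1⟩, hbc.2⟩)
      exact aux j hpath

-- the two connectivity tests agree on every mask < 2^(N+1)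
theorem pv_mask_eq (graph : List (List Int)) (nbm : List Nat) (N : Nat)
    (hrow : ∀ c : Int, 0 ≤ c → ∀ j : Nat,
      ((nbm.getD c.toNat 0).testBit j = true ↔ (j : Int) ∈ (PySem.List.pyGet? graph c).getD []))
    (mask : Nat) (hm : mask < 2 ^ (N + 1)) :
    bfsA mask graph N = connB mask nbm N := by
  simp only [bfsA, connB]
  rcases hfind : (PySem.List.pyRange 1 ((N : Int) + 1) 1).find? (fun i => mask.testBit i.toNat)
    with - | i
  · have hall : ∀ j : Nat, 1 ≤ j → j ≤ N → mask.testBit j = false := by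
      intro j h1 hN
      have hmem : (j : Int) ∈ PySem.List.pyRange 1 ((N : Int) + 1) 1 := by
        rw [PySem.List.mem_pyRange_one]
        omega
      have hx := List.find?_eq_none.mp hfind _ hmem
      simp only [Int.toNat_natCast] at hx
      cases hb : mask.testBit j
      · rfl
      · exact absurd hb hx
    have hlow : pyAndNot mask 1 = 0 := by
      refine Nat.eq_of_testBit_eq (fun j => ?_)
      rw [pv_testBit_pyAndNot, Nat.zero_testBit]
      match j with
      | 0 =>
        rw [show Nat.testBit 1 0 = true from rfl]
        cases mask.testBit 0 <;> rfl
      | (j + 1) =>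
        have hbit : mask.testBit (j + 1) = false := by
          by_cases hN : j + 1 ≤ N
          · exact hall _ (by omega) hN
          · cases hb : mask.testBit (j + 1)
            · rfl
            · have := pv_testBit_le hm hb
              omega
        rw [hbit]
        rfl
    simp only [hfind]
    rw [show bfsInner graph [] mask = mask from by simp [bfsInner], hlow]
    simp
  · have hpred : mask.testBit i.toNat = true := by
      have := List.find?_some hfind
      simpa using this
    have hmem : 1 ≤ i ∧ i < (N : Int) + 1 := by
      have := List.mem_of_find?_eq_some hfind
      rwa [PySem.List.mem_pyRange_one] at this
    have h1 : 1 ≤ i.toNat := by omega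
    have hiN : i.toNat ≤ N := by omega
    have hlowne : ¬ ((pyAndNot mask 1 == 0) = true) := by
      rw [beq_iff_eq]
      intro h0
      have hb : (pyAndNot mask 1).testBit i.toNat = true := by
        rw [pv_testBit_pyAndNot, hpred]
        have ht : Nat.testBit 1 i.toNat = false := by
          rw [show (1 : Nat) = 2 ^ 0 from rfl, Nat.testBit_two_pow]
          simp
          omega
        rw [ht]
        rfl
      rw [h0, Nat.zero_testBit] at hb
      cases hb
    simp only [hfind]
    rw [if_neg hlowne]
    have hiter : List.foldl
        (fun reach x => reach |||
          (List.foldl (fun f i => if reach.testBit i then f ||| nbm.getD i 0 else f) 0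
              (List.range (N + 1)) &&& mask))
        (1 <<< i.toNat) (List.range (N + 1)) = (pvF nbm mask N)^[N + 1] (1 <<< i.toNat) :=
      pv_foldl_const_iterate (pvF nbm mask N) (N + 1) (1 <<< i.toNat)
    rw [hiter]
    rw [Bool.eq_iff_iff, beq_iff_eq, beq_iff_eq]
    have hm' : pyAndNot mask (1 <<< i.toNat) < 2 ^ (N + 1) :=
      Nat.lt_of_le_of_lt (pv_pyAndNot_le _ _) hm
    have hq' : ∀ c ∈ [i], 0 ≤ c ∧ (pyAndNot mask (1 <<< i.toNat)).testBit c.toNat = false := by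
      intro c hc
      rw [List.mem_singleton] at hc
      subst hc
      refine ⟨by omega, ?_⟩
      rw [pv_testBit_pyAndNot, Nat.one_shiftLeft, Nat.testBit_two_pow]
      simp
    rw [pv_bfsInner_iff graph (fun k => nbm.getD k 0) N hrow [i] _ hm' hq']
    rw [pv_pyAndNot_eq_zero_iff]
    constructor
    · intro hL j hmj
      rw [pv_reach_char nbm N mask i.toNat hpred hiN hm j]
      by_cases hjs : j = i.toNat
      · exact Or.inl hjs
      · have hm'j : (pyAndNot mask (1 <<< i.toNat)).testBit j = true := by
          rw [pv_testBit_pyAndNot, Nat.one_shiftLeft, Nat.testBit_two_pow, hmj]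
          simp [Ne.symm hjs]
        obtain ⟨c, hc, hpath⟩ := hL j hm'j
        rw [List.mem_singleton] at hc
        subst hc
        refine Or.inr ⟨hmj, pv_rch_mono ?_ hpath⟩
        intro k hk
        rw [pv_testBit_pyAndNot] at hk
        exact (Bool.and_eq_true_iff.mp hk).1
    · intro hR j hm'j
      have hmj : mask.testBit j = true := by
        rw [pv_testBit_pyAndNot] at hm'j
        exact (Bool.and_eq_true_iff.mp hm'j).1
      have hjs : j ≠ i.toNat := by
        intro he
        rw [he, pv_testBit_pyAndNot, Nat.one_shiftLeft, Nat.testBit_two_pow] at hm'j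
        simp at hm'j
      have hrc := hR j hmj
      rw [pv_reach_char nbm N mask i.toNat hpred hiN hm j] at hrc
      rcases hrc with he | ⟨-, hpath⟩
      · exact absurd he hjs
      · rcases pv_drop_start hpath with he | hpath'
        · exact absurd he hjs
        · exact ⟨i, List.mem_singleton.mpr rfl, hpath'⟩

-- the builder fold `for i in range(n): g[i+1] = f(i)`
theorem pv_build_getD {α : Type} (f : Nat → α) (d : α) :
    ∀ (n : Nat) (l : List α) (j : Nat),
    ((List.range n).foldl (fun g i => g.set (i + 1) (f i)) l).getD j d =
      if 1 ≤ j ∧ j ≤ n ∧ j < l.length then f (j - 1) else l.getD j d := by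
  intro n
  induction n with
  | zero => intro l j; simp only [List.range_zero, List.foldl_nil]; rw [if_neg (by omega)]
  | succ n ih =>
    intro l j
    rw [List.range_succ, List.foldl_append]
    simp only [List.foldl_cons, List.foldl_nil]
    have hlen : ∀ (m : Nat) (l' : List α),
        ((List.range m).foldl (fun g i => g.set (i + 1) (f i)) l').length = l'.length := by
      intro m
      induction m with
      | zero => intro l'; simp
      | succ m ihm => intro l'; rw [List.range_succ, List.foldl_append]; simp [ihm]
    by_cases hj : j = n + 1
    · subst hj
      have hflen : ((List.range n).foldl (fun g i => g.set (i + 1) (f i)) l).length = l.length :=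
        hlen n l
      rw [List.getD_eq_getElem?_getD, List.getElem?_set, if_pos rfl, hflen]
      by_cases hl : n + 1 < l.length
      · rw [if_pos hl]
        simp only [Option.getD_some]
        rw [if_pos (by omega)]
        simp
      · rw [if_neg hl]
        simp only [Option.getD_none]
        rw [if_neg (by omega : ¬(1 ≤ n + 1 ∧ n + 1 ≤ n + 1 ∧ n + 1 < l.length)),
          List.getD_eq_getElem?_getD, List.getElem?_eq_none (by omega), Option.getD_none]
    · rw [List.getD_eq_getElem?_getD, List.getElem?_set, if_neg (fun h => hj h.symm),
        ← List.getD_eq_getElem?_getD, ih l j]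
      by_cases h1 : 1 ≤ j ∧ j ≤ n ∧ j < l.length
      · rw [if_pos h1, if_pos (by omega)]
      · rw [if_neg h1, if_neg (by omega)]

-- bitmask of a row of nonnegative ids: bit j set iff the id j occurs in the row
theorem pv_orMask_testBit (row : List Int) (hpos : ∀ x ∈ row, 0 ≤ x) (j : Nat) :
    ((orMaskB row).testBit j = true) ↔ (j : Int) ∈ row := by
  have aux : ∀ (r : List Int), (∀ x ∈ r, 0 ≤ x) → ∀ (acc : Nat) (j : Nat),
      ((r.foldl (fun m v => m ||| (1 <<< v.toNat)) acc).testBit j = true)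
      ↔ (acc.testBit j = true ∨ (j : Int) ∈ r) := by
    intro r
    induction r with
    | nil => intro _ acc j; simp
    | cons v rest ih =>
      intro hp acc j
      simp only [List.foldl_cons]
      rw [ih (fun x hx => hp x (List.mem_cons_of_mem _ hx))]
      rw [Nat.testBit_or, Nat.one_shiftLeft, Nat.testBit_two_pow]
      have hv0 : 0 ≤ v := hp v List.mem_cons_self
      simp only [List.mem_cons, Bool.or_eq_true, decide_eq_true_eq]
      constructor
      · rintro ((ha | hb) | hc)
        · exact Or.inl ha
        · exact Or.inr (Or.inl (by omega))
        · exact Or.inr (Or.inr hc)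
      · rintro (ha | (hb | hb))
        · exact Or.inl (Or.inl ha)
        · exact Or.inl (Or.inr (by omega))
        · exact Or.inr hb
  rw [orMaskB, aux row hpos]
  simp

-- ===== VERDICT (by name: the statement is the Claim_ definition above) =====
theorem solution_spec : Claim_equal_solution := by
  unfold Claim_equal_solution
  intro P A hDom hPre
  unfold Spec_solution solution solution_alt
  simp only []
  set G := (List.range P.length).foldl
    (fun g i => g.set (i + 1) (PySem.List.slice ((PySem.List.pyGet? A (i : Int)).getD []) (some 1) none))
    (List.replicate (P.length + 1) ([] : List Int)) with hG
  set B := (List.range P.length).foldl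
    (fun g i => g.set (i + 1)
      (orMaskB (PySem.List.slice ((PySem.List.pyGet? A (i : Int)).getD []) (some 1) none)))
    (List.replicate (P.length + 1) (0 : Nat)) with hB
  have hGget : ∀ k : Nat, G.getD k [] =
      if 1 ≤ k ∧ k ≤ P.length
      then PySem.List.slice ((PySem.List.pyGet? A ((k - 1 : Nat) : Int)).getD []) (some 1) none
      else [] := by
    intro k
    have h0 : G.getD k [] =
        if 1 ≤ k ∧ k ≤ P.length ∧ k < (List.replicate (P.length + 1) ([] : List Int)).length
        then PySem.List.slice ((PySem.List.pyGet? A ((k - 1 : Nat) : Int)).getD []) (some 1) none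
        else (List.replicate (P.length + 1) ([] : List Int)).getD k [] :=
      pv_build_getD _ _ _ _ _
    rw [h0]
    by_cases h : 1 ≤ k ∧ k ≤ P.length
    · rw [if_pos ⟨h.1, h.2, by rw [List.length_replicate]; omega⟩, if_pos h]
    · rw [if_neg (fun hc => h ⟨hc.1, hc.2.1⟩), if_neg h, List.getD_eq_getElem?_getD,
        List.getElem?_replicate]
      by_cases hk : k < P.length + 1
      · rw [if_pos hk]
        rfl
      · rw [if_neg hk]
        rfl
  have hBget : ∀ k : Nat, B.getD k 0 =
      if 1 ≤ k ∧ k ≤ P.length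
      then orMaskB
        (PySem.List.slice ((PySem.List.pyGet? A ((k - 1 : Nat) : Int)).getD []) (some 1) none)
      else 0 := by
    intro k
    have h0 : B.getD k 0 =
        if 1 ≤ k ∧ k ≤ P.length ∧ k < (List.replicate (P.length + 1) (0 : Nat)).length
        then orMaskB
          (PySem.List.slice ((PySem.List.pyGet? A ((k - 1 : Nat) : Int)).getD []) (some 1) none)
        else (List.replicate (P.length + 1) (0 : Nat)).getD k 0 :=
      pv_build_getD _ _ _ _ _
    rw [h0]
    by_cases h : 1 ≤ k ∧ k ≤ P.length
    · rw [if_pos ⟨h.1, h.2, by rw [List.length_replicate]; omega⟩, if_pos h]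
    · rw [if_neg (fun hc => h ⟨hc.1, hc.2.1⟩), if_neg h, List.getD_eq_getElem?_getD,
        List.getElem?_replicate]
      by_cases hk : k < P.length + 1
      · rw [if_pos hk]
        rfl
      · rw [if_neg hk]
        rfl
  -- Pre_ gives: every entry of the sliced row (the tail of A[k-1]) is nonnegative
  have hpos : ∀ k : Nat, 1 ≤ k → k ≤ P.length →
      ∀ x ∈ PySem.List.slice ((PySem.List.pyGet? A ((k - 1 : Nat) : Int)).getD []) (some 1) none, 0 ≤ x := by
    intro k h1 h2 x hx
    have hPA := hPre.1
    rw [PySem.List.slice_from_one] at hx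
    have hlt : k - 1 < A.length := by omega
    have hget : (PySem.List.pyGet? A ((k - 1 : Nat) : Int)).getD [] = A[k - 1] := by
      rw [PySem.List.pyGet?_of_nonneg A (by omega), Int.toNat_natCast,
        List.getElem?_eq_getElem hlt, Option.getD_some]
    rw [hget] at hx
    refine hPre.2 A[k - 1] ?_ x hx
    exact List.mem_take_iff_getElem.mpr ⟨k - 1, by omega, rfl⟩
  have hrow : ∀ c : Int, 0 ≤ c → ∀ j : Nat,
      ((B.getD c.toNat 0).testBit j = true ↔
        (j : Int) ∈ (PySem.List.pyGet? G c).getD []) := by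
    intro c hc j
    have hpg : (PySem.List.pyGet? G c).getD [] = G.getD c.toNat [] := by
      rw [PySem.List.pyGet?_of_nonneg G hc, List.getD_eq_getElem?_getD]
    rw [hpg, hGget c.toNat, hBget c.toNat]
    by_cases h : 1 ≤ c.toNat ∧ c.toNat ≤ P.length
    · rw [if_pos h, if_pos h]
      exact pv_orMask_testBit _ (hpos c.toNat h.1 h.2) j
    · rw [if_neg h, if_neg h]
      simp
  refine congrArg (fun md : Option Int => match md with | some d => d | none => (-1 : Int)) ?_
  refine PySem.List.foldl_congr_mem _ _ _ _ ?_
  intro md mi hmi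
  rw [PySem.List.mem_pyRange_one] at hmi
  have h2 : ((2 : Int) ^ (P.length + 1)) = ((2 ^ (P.length + 1) : Nat) : Int) := by
    push_cast
    ring
  have hmask : mi.toNat < 2 ^ (P.length + 1) := by omega
  have hother : mi.toNat ^^^ (2 ^ (P.length + 1) - 2) < 2 ^ (P.length + 1) :=
    Nat.xor_lt_two_pow hmask (Nat.sub_lt (Nat.two_pow_pos _) (by norm_num))
  rw [pv_mask_eq G B P.length hrow mi.toNat hmask,
    pv_mask_eq G B P.length hrow (mi.toNat ^^^ (2 ^ (P.length + 1) - 2)) hother]
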